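-- pv_equiv track=rewrite | github.com/Data-Provenance-Initiative/Data-Provenance-Collection | src/downloaders.py | split_by_user
-- ===== SOURCE A (Python) =====
-- def split_by_user(pairs):
--     """
--     Group (user, value) pairs into lists of pairs with the same user value
--     """
--
--     groups = []
--     current_group = []
--
--     for kind, value in pairs:
--         if kind == "user":
--             if current_group:
--                 groups.append(current_group)
--             current_group = [(kind, value)]
--         else:
--             current_group.append((kind, value))
--
--     if current_group:
--         groups.append(current_group)
--
--     return groups
-- ===== SOURCE B (Python) =====
-- def split_by_user(pairs):
--     """
--     Group (user, value) pairs into lists of pairs with the same user value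
--     """
--     pairs = [(kind, value) for kind, value in pairs]
--     n = len(pairs)
--     groups = []
--     i = 0
--     while i < n:
--         j = i + 1
--         while j < n and pairs[j][0] != "user":
--             j += 1
--         groups.append(pairs[i:j])
--         i = j
--     return groups
-- ===== Notes on version B (the rewrite author's own statement) =====
-- stated objective: alternative
-- what changed: A streams through the pairs maintaining a current-group accumulator that is flushed at each 'user' delimiter; B is a two-pointer index scan that finds the next 'user' boundary and slices each whole group out of the materialised list.
import Mathlib
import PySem

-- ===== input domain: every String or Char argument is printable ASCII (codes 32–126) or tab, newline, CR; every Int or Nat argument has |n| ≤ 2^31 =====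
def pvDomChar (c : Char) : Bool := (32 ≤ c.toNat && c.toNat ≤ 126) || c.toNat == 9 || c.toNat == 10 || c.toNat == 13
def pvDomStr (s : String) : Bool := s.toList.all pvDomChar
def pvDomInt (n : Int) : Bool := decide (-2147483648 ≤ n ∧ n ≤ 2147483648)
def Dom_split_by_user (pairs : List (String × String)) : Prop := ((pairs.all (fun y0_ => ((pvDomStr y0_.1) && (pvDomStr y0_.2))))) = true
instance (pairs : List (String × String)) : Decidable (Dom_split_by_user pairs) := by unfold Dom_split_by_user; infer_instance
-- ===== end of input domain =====

-- B replaces A's streaming flush-accumulator loop by a two-pointer scan that finds the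
-- next "user" boundary and slices each group out directly (alternative decomposition).

-- ===== PORT A =====
-- one iteration of A's for-loop over the state (groups, current_group)
def splitStepA (s : List (List (String × String)) × List (String × String))
    (kv : String × String) : List (List (String × String)) × List (String × String) :=
  if kv.1 == "user" then
    (if s.2.isEmpty then s.1 else s.1 ++ [s.2], [kv])
  else
    (s.1, s.2 ++ [kv])

def split_by_user (pairs : List (String × String)) : List (List (String × String)) :=
  let s := pairs.foldl splitStepA ([], [])
  if s.2.isEmpty then s.1 else s.1 ++ [s.2]

-- ===== PORT B =====
-- inner while loop: advance j while j < n and pairs[j][0] != "user"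
-- (pairs.getD j default is exact here: pairs[j] is only read when j < n = pairs.length)
def splitFindNext (pairs : List (String × String)) (n j : Nat) : Nat :=
  if _h : j < n then
    if (pairs.getD j ("", "")).1 == "user" then j else splitFindNext pairs n (j + 1)
  else j
termination_by n - j

-- needed by splitOuterB's termination proof
theorem splitFindNext_ge (pairs : List (String × String)) (n j : Nat) :
    j ≤ splitFindNext pairs n j := by
  unfold splitFindNext
  split
  · split
    · exact Nat.le_refl j
    · have := splitFindNext_ge pairs n (j + 1)
      omega
  · exact Nat.le_refl j
termination_by n - j

-- outer while loop over i, appending the slice pairs[i:j] of each group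
-- ((pairs.drop i).take (j - i) is exactly Python's pairs[i:j] for these natural i ≤ j,
--  cf. PySem.List.slice_natCast)
def splitOuterB (pairs : List (String × String)) (n i : Nat)
    (acc : List (List (String × String))) : List (List (String × String)) :=
  if _h : i < n then
    let j := splitFindNext pairs n (i + 1)
    splitOuterB pairs n j (acc ++ [(pairs.drop i).take (j - i)])
  else acc
termination_by n - i
decreasing_by
  have := splitFindNext_ge pairs n (i + 1)
  omega

def split_by_user_alt (pairs : List (String × String)) : List (List (String × String)) :=
  splitOuterB pairs pairs.length 0 []

-- ===== PRECONDITION & SPEC =====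
def Spec_split_by_user (pairs : List (String × String)) (out : List (List (String × String))) : Prop := out = split_by_user_alt pairs
instance (pairs : List (String × String)) (out : List (List (String × String))) : Decidable (Spec_split_by_user pairs out) := by unfold Spec_split_by_user; infer_instance

-- ===== CLAIM (what is proved, stated in full; the proofs are below) =====
def Claim_equal_split_by_user : Prop := ∀ (pairs : List (String × String)), Dom_split_by_user pairs → Spec_split_by_user pairs (split_by_user pairs)

-- ===== LEMMAS AND PROOFS =====

-- predicate "not a 'user' pair"
def pvQ (p : String × String) : Bool := !(p.1 == "user")

-- the common specification: recursive splitter on "user" boundaries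
def grSpec : List (String × String) → List (List (String × String))
  | [] => []
  | x :: xs => (x :: xs.takeWhile pvQ) :: grSpec (xs.dropWhile pvQ)
termination_by l => l.length
decreasing_by
  have := List.length_dropWhile_le pvQ xs
  simp only [List.length_cons]
  omega

theorem grSpec_cons (x : String × String) (xs : List (String × String)) :
    grSpec (x :: xs) = (x :: xs.takeWhile pvQ) :: grSpec (xs.dropWhile pvQ) := by
  rw [grSpec]

-- A's finalisation step
def finA (s : List (List (String × String)) × List (String × String)) :
    List (List (String × String)) :=
  if s.2.isEmpty then s.1 else s.1 ++ [s.2]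

-- groups already flushed are only ever appended to
theorem foldA_acc (l : List (String × String)) (gs : List (List (String × String)))
    (cur : List (String × String)) :
    finA (List.foldl splitStepA (gs, cur) l) = gs ++ finA (List.foldl splitStepA ([], cur) l) := by
  induction l generalizing gs cur with
  | nil => by_cases h : cur.isEmpty <;> simp [finA, h]
  | cons x l ih =>
    simp only [List.foldl_cons, splitStepA]
    by_cases hx : x.1 == "user"
    · by_cases hc : cur.isEmpty
      · simp only [hx, hc, ite_true]
        exact ih gs [x]
      · simp only [hx, hc, ite_true, ite_false, Bool.false_eq_true]
        rw [ih (gs ++ [cur]) [x], ih ([] ++ [cur]) [x]]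
        simp
    · simp only [hx, Bool.false_eq_true, ite_false]
      exact ih gs (cur ++ [x])

-- running A's loop from an open nonempty current group
theorem foldA_ne (l : List (String × String)) (cur : List (String × String)) (h : cur ≠ []) :
    finA (List.foldl splitStepA ([], cur) l)
      = (cur ++ l.takeWhile pvQ) :: grSpec (l.dropWhile pvQ) := by
  induction l generalizing cur with
  | nil => simp [finA, h, grSpec]
  | cons x l ih =>
    simp only [List.foldl_cons, splitStepA]
    by_cases hx : x.1 == "user"
    · have hc : cur.isEmpty = false := by simpa using h
      simp only [hx, hc, ite_true, Bool.false_eq_true, ite_false]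
      rw [foldA_acc, ih [x] (by simp)]
      simp only [List.takeWhile_cons, List.dropWhile_cons, pvQ, hx, Bool.not_true,
        Bool.false_eq_true, ite_false, grSpec_cons]
      simp
    · simp only [hx, Bool.false_eq_true, ite_false]
      rw [ih (cur ++ [x]) (by simp)]
      rw [List.takeWhile_cons, List.dropWhile_cons]
      simp [pvQ, hx]
  
theorem A_eq_gr (pairs : List (String × String)) : split_by_user pairs = grSpec pairs := by
  show finA (List.foldl splitStepA ([], []) pairs) = grSpec pairs
  cases pairs with
  | nil => simp [finA, grSpec]
  | cons x l =>
    have hstep : splitStepA ([], []) x = ([], [x]) := by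
      by_cases hx : x.1 == "user" <;> simp [splitStepA, hx]
    simp only [List.foldl_cons, hstep]
    rw [foldA_ne l [x] (by simp), grSpec_cons]
    simp

-- characterisation of the inner while loop
theorem splitFindNext_spec (pairs : List (String × String)) (n j : Nat)
    (hn : n = pairs.length) (hj : j ≤ n) :
    splitFindNext pairs n j = j + ((pairs.drop j).takeWhile pvQ).length := by
  unfold splitFindNext
  split
  · rename_i h
    have hjl : j < pairs.length := by omega
    have hdrop : pairs.drop j = pairs[j] :: pairs.drop (j + 1) :=
      List.drop_eq_getElem_cons hjl
    have hget : pairs.getD j ("", "") = pairs[j] := List.getD_eq_getElem pairs _ hjl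
    by_cases hx : (pairs[j]).1 == "user"
    · rw [hget]
      simp only [hx, ite_true]
      rw [hdrop, List.takeWhile_cons]
      simp [pvQ, hx]
    · rw [hget]
      simp only [hx, Bool.false_eq_true, ite_false]
      rw [splitFindNext_spec pairs n (j + 1) hn (by omega)]
      rw [hdrop, List.takeWhile_cons]
      simp [pvQ, hx]
      omega
  · rename_i h
    have : pairs.length ≤ j := by omega
    simp [List.drop_eq_nil_of_le this]
termination_by n - j

-- the outer loop only ever appends to its accumulator
theorem outerB_acc (pairs : List (String × String)) (n i : Nat)
    (acc : List (List (String × String))) :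
    splitOuterB pairs n i acc = acc ++ splitOuterB pairs n i [] := by
  unfold splitOuterB
  split
  · rename_i h
    have := splitFindNext_ge pairs n (i + 1)
    rw [outerB_acc pairs n _ (acc ++ _), outerB_acc pairs n _ ([] ++ _)]
    simp
  · simp
termination_by n - i
decreasing_by
  all_goals (have := splitFindNext_ge pairs n (i + 1); omega)

-- the outer loop computes grSpec of the remaining suffix
theorem outerB_eq (pairs : List (String × String)) (n i : Nat) (hn : n = pairs.length) :
    splitOuterB pairs n i [] = grSpec (pairs.drop i) := by
  unfold splitOuterB
  split
  · rename_i h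
    have hji : i + 1 ≤ splitFindNext pairs n (i + 1) := splitFindNext_ge pairs n (i + 1)
    have hspec := splitFindNext_spec pairs n (i + 1) hn (by omega)
    set t := (pairs.drop (i + 1)).takeWhile pvQ with ht
    have htle : t.length ≤ (pairs.drop (i + 1)).length := (List.takeWhile_prefix pvQ).length_le
    have hjn : splitFindNext pairs n (i + 1) ≤ n := by
      rw [hspec]; simp only [List.length_drop] at htle; omega
    rw [outerB_acc, outerB_eq pairs n _ hn]
    have hil : i < pairs.length := by omega
    have hdrop : pairs.drop i = pairs[i] :: pairs.drop (i + 1) :=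
      List.drop_eq_getElem_cons hil
    -- the slice pairs[i:j] is the head plus the takeWhile block
    have hslice : (pairs.drop i).take (splitFindNext pairs n (i + 1) - i)
        = pairs[i] :: t := by
      rw [hdrop, hspec]
      have : i + 1 + t.length - i = t.length + 1 := by omega
      rw [this, List.take_succ_cons]
      congr 1
      exact ((List.prefix_iff_eq_take).mp (List.takeWhile_prefix pvQ)).symm
    -- the rest starts exactly at j
    have hrest : pairs.drop (splitFindNext pairs n (i + 1))
        = (pairs.drop (i + 1)).dropWhile pvQ := by
      rw [hspec]
      have h1 : pairs.drop (i + 1 + t.length) = (pairs.drop (i + 1)).drop t.length := by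
        rw [List.drop_drop]
      rw [h1]
      conv_lhs => rw [← List.takeWhile_append_dropWhile (p := pvQ) (l := pairs.drop (i + 1))]
      rw [← ht]
      simp
    rw [hslice, hrest, hdrop, grSpec_cons]
    simp [ht]
  · rename_i h
    have : pairs.length ≤ i := by omega
    simp [List.drop_eq_nil_of_le this, grSpec]
termination_by n - i
decreasing_by
  all_goals (have := splitFindNext_ge pairs n (i + 1); omega)

theorem B_eq_gr (pairs : List (String × String)) : split_by_user_alt pairs = grSpec pairs := by
  show splitOuterB pairs pairs.length 0 [] = grSpec pairs
  rw [outerB_eq pairs pairs.length 0 rfl, List.drop_zero]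

-- ===== VERDICT (by name: the statement is the Claim_ definition above) =====
theorem split_by_user_spec : Claim_equal_split_by_user := by
  intro pairs _
  unfold Spec_split_by_user
  rw [A_eq_gr, B_eq_gr]
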